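-- pv_equiv track=rewrite | github.com/leggongum/tg_shop | tg_bot/src/services/menu/catalog.py | constuct_back_button_and_prev
-- ===== SOURCE A (Python) =====
-- def constuct_back_button_and_prev(prev: str) -> tuple[str]:
--     track = prev.split(':')[-1]
--     back = ''
--     is_first_alpha = True
--     for n, c in enumerate(track):
--         if c.isalpha():
--             if is_first_alpha:
--                 is_first_alpha = False
--                 back += c
--             else:
--                 back += track[n:]
--                 break
--         elif c == '.':
--             back += ':'
--         else:
--             back += c
--
--     prev = prev.replace(':', '.')
--     return back, prev
-- ===== SOURCE B (Python) =====
-- def constuct_back_button_and_prev(prev: str) -> tuple[str]: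
--     track = prev.split(':')[-1]
--     # idx = index of the SECOND alphabetic character (len(track) if fewer than two)
--     idx = len(track)
--     seen = 0
--     for i, c in enumerate(track):
--         if c.isalpha():
--             seen += 1
--             if seen == 2:
--                 idx = i
--                 break
--     back = ''.join(':' if c == '.' else c for c in track[:idx]) + track[idx:]
--     return back, prev.replace(':', '.')
-- ===== Notes on version B (the rewrite author's own statement) =====
-- stated objective: simpler
-- what changed: A builds `back` char-by-char through a state machine with an in-loop break and per-char branching; B instead locates the index of the second alphabetic character, then constructs back as the dot-to-colon-mapped prefix plus the verbatim suffix.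
import Mathlib
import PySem

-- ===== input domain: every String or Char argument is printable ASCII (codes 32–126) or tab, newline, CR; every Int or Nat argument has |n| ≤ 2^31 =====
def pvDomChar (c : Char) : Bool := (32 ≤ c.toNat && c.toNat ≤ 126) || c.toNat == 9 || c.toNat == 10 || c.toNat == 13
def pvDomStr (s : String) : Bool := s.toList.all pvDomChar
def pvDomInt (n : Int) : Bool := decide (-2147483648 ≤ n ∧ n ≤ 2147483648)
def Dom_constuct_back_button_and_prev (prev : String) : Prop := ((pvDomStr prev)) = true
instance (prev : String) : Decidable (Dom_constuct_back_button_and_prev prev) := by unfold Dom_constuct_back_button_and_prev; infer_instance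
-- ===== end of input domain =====

set_option maxRecDepth 4000


-- B replaces A's char-by-char state machine by: find the index of the second alpha char,
-- then map dots to colons in the prefix and append the suffix verbatim (objective: simpler).

-- ===== PORT A =====
-- the for-loop of A: state = (index n, is_first_alpha, accumulated back); `break` = stop recursing
def pvGoA (full : List Char) : List Char → Nat → Bool → List Char → List Char
  | [], _, _, acc => acc
  | c :: cs, n, first, acc =>
    if PySem.Chars.isalpha c then
      if first then pvGoA full cs (n + 1) false (acc ++ [c])
      else acc ++ full.drop n          -- back += track[n:]; break
    else if c = '.' then pvGoA full cs (n + 1) first (acc ++ [':'])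
    else pvGoA full cs (n + 1) first (acc ++ [c])

def constuct_back_button_and_prev (prev : String) : String × String :=
  let track := (PySem.Chars.splitOn prev.toList [':']).getLastD []   -- prev.split(':')[-1]; split is never empty
  let back := pvGoA track track 0 true []
  (String.mk back, String.mk (PySem.Chars.replace prev.toList [':'] ['.']))

-- ===== PORT B =====
-- Source B's loop: index of the SECOND alpha char, len(track) if fewer than two (seen1 = one alpha seen so far)
def pvIdx2 : List Char → Bool → Nat
  | [], _ => 0
  | c :: cs, seen1 =>
    if PySem.Chars.isalpha c then
      (if seen1 then 0 else pvIdx2 cs true + 1)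
    else pvIdx2 cs seen1 + 1

def constuct_back_button_and_prev_alt (prev : String) : String × String :=
  let track := (PySem.Chars.splitOn prev.toList [':']).getLastD []   -- prev.split(':')[-1]; split is never empty
  let idx := pvIdx2 track false
  let back := (track.take idx).map (fun c => if c = '.' then ':' else c) ++ track.drop idx
  (String.mk back, String.mk (PySem.Chars.replace prev.toList [':'] ['.']))

-- ===== PRECONDITION & SPEC =====
def Spec_constuct_back_button_and_prev (prev : String) (out : String × String) : Prop := out = constuct_back_button_and_prev_alt prev
instance (prev : String) (out : String × String) : Decidable (Spec_constuct_back_button_and_prev prev out) := by unfold Spec_constuct_back_button_and_prev; infer_instance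

-- ===== CLAIM (what is proved, stated in full; the proofs are below) =====
def Claim_equal_constuct_back_button_and_prev : Prop := ∀ (prev : String), Dom_constuct_back_button_and_prev prev → Spec_constuct_back_button_and_prev prev (constuct_back_button_and_prev prev)

-- ===== LEMMAS AND PROOFS =====

theorem pvDotNotAlpha : PySem.Chars.isalpha '.' = false := by decide

theorem pvGoA_false (cs : List Char) : ∀ (full : List Char) (n : Nat) (acc : List Char),
    full.drop n = cs →
    pvGoA full cs n false acc
      = acc ++ (cs.take (pvIdx2 cs true)).map (fun c => if c = '.' then ':' else c)
            ++ cs.drop (pvIdx2 cs true) := by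
  induction cs with
  | nil => intro full n acc h; simp [pvGoA, pvIdx2]
  | cons c cs ih =>
    intro full n acc h
    have hdrop : full.drop (n + 1) = cs := by
      rw [← List.tail_drop, h]; rfl
    by_cases ha : PySem.Chars.isalpha c = true
    · simp only [pvGoA, pvIdx2, ha, if_true, Bool.false_eq_true, if_false,
        List.take_zero, List.map_nil, List.append_nil, List.drop_zero, h]
    · have ha' : PySem.Chars.isalpha c = false := by simpa using ha
      by_cases hd : c = '.'
      · subst hd
        simp only [pvGoA, pvIdx2, pvDotNotAlpha, Bool.false_eq_true, if_false, if_true,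
          ih full (n + 1) _ hdrop, List.take_succ_cons, List.map_cons, List.drop_succ_cons,
          List.append_assoc, List.cons_append, List.nil_append]
      · simp only [pvGoA, pvIdx2, ha', Bool.false_eq_true, if_false, if_neg hd,
          ih full (n + 1) _ hdrop, List.take_succ_cons, List.map_cons, List.drop_succ_cons,
          List.append_assoc, List.cons_append, List.nil_append]

theorem pvGoA_true (cs : List Char) : ∀ (full : List Char) (n : Nat) (acc : List Char),
    full.drop n = cs →
    pvGoA full cs n true acc
      = acc ++ (cs.take (pvIdx2 cs false)).map (fun c => if c = '.' then ':' else c)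
            ++ cs.drop (pvIdx2 cs false) := by
  induction cs with
  | nil => intro full n acc h; simp [pvGoA, pvIdx2]
  | cons c cs ih =>
    intro full n acc h
    have hdrop : full.drop (n + 1) = cs := by
      rw [← List.tail_drop, h]; rfl
    by_cases ha : PySem.Chars.isalpha c = true
    · have hc : c ≠ '.' := by
        intro hcc; rw [hcc, pvDotNotAlpha] at ha; simp at ha
      simp only [pvGoA, pvIdx2, ha, if_true, Bool.false_eq_true, if_false,
        pvGoA_false cs full (n + 1) _ hdrop, List.take_succ_cons, List.map_cons,
        List.drop_succ_cons, List.append_assoc, List.cons_append, List.nil_append, if_neg hc]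
    · have ha' : PySem.Chars.isalpha c = false := by simpa using ha
      by_cases hd : c = '.'
      · subst hd
        simp only [pvGoA, pvIdx2, pvDotNotAlpha, Bool.false_eq_true, if_false, if_true,
          ih full (n + 1) _ hdrop, List.take_succ_cons, List.map_cons, List.drop_succ_cons,
          List.append_assoc, List.cons_append, List.nil_append]
      · simp only [pvGoA, pvIdx2, ha', Bool.false_eq_true, if_false, if_neg hd,
          ih full (n + 1) _ hdrop, List.take_succ_cons, List.map_cons, List.drop_succ_cons,
          List.append_assoc, List.cons_append, List.nil_append]

-- ===== VERDICT (by name: the statement is the Claim_ definition above) =====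
theorem constuct_back_button_and_prev_spec : Claim_equal_constuct_back_button_and_prev := by
  intro prev _
  unfold Spec_constuct_back_button_and_prev constuct_back_button_and_prev constuct_back_button_and_prev_alt
  dsimp only
  generalize (PySem.Chars.splitOn prev.toList [':']).getLastD [] = t
  rw [pvGoA_true t t 0 [] rfl, List.nil_append]
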